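-- pv_equiv track=rewrite | github.com/gcheng9430/InterviewPrep | Guo/26mock.py | minimalKSum2
-- ===== SOURCE A (Python) =====
-- def minimalKSum2(nums,k):
--     mySet = set(nums)
--     curr = 1
--     n = k-len(nums)
--     missing = []
--     while len(missing)<n:
--         while  curr in mySet:
--             curr +=1
--         missing.append(curr)
--         curr+=1
--     return sum(missing)
-- ===== SOURCE B (Python) =====
-- def minimalKSum2(nums, k):
--     n = k - len(nums)
--     if n <= 0:
--         return 0
--     total = 0
--     prev = 0
--     for v in sorted(set(nums)):
--         if v <= prev:
--             continue
--         gap = v - prev - 1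
--         take = gap if gap < n else n
--         total += take * (2 * prev + take + 1) // 2
--         n -= take
--         if n == 0:
--             return total
--         prev = v
--     return total + n * (2 * prev + n + 1) // 2
-- ===== Notes on version B (the rewrite author's own statement) =====
-- stated objective: faster
-- what changed: A scans candidate integers 1,2,3,... one by one against the set until it has collected k-len(nums) missing values and sums them; B sorts the distinct values once and sums each whole gap of missing integers with an arithmetic-series formula, never enumerating individual missing numbers.
import Mathlib
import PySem

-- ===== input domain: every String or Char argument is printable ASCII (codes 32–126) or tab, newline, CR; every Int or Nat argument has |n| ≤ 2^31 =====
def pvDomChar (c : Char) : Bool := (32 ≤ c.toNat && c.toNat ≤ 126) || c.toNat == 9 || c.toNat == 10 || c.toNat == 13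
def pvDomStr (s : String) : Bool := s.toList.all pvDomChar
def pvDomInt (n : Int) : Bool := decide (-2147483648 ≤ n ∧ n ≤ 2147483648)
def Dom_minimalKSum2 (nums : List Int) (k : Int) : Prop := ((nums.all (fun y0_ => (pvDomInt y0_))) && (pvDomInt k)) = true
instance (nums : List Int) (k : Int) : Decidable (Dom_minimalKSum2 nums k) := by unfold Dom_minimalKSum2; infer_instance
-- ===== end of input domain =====

-- B replaces A's value-by-value upward scan with a single pass over the sorted distinct
-- values, summing each gap of missing integers by an arithmetic-series formula (objective: faster).

-- ===== PORT A =====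
-- termination helper for the inner `while curr in mySet: curr += 1` loop
theorem pvFilterGeDec (S : List Int) (curr : Int) (h : curr ∈ S) :
    (S.filter (fun x => decide (curr+1 ≤ x))).length < (S.filter (fun x => decide (curr ≤ x))).length := by
  have he : S.filter (fun x => decide (curr+1 ≤ x))
      = (S.filter (fun x => decide (curr ≤ x))).filter (fun x => decide (curr+1 ≤ x)) := by
    rw [List.filter_filter]; apply List.filter_congr; intro x _; simp; omega
  rw [he]
  exact List.length_filter_lt_length_iff_exists.mpr
    ⟨curr, by simp [List.mem_filter, h], by simp⟩

-- `while curr in mySet: curr += 1`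
def pvAdvance (S : List Int) (curr : Int) : Int :=
  if h : S.contains curr then pvAdvance S (curr + 1) else curr
termination_by (S.filter (fun x => decide (curr ≤ x))).length
decreasing_by exact pvFilterGeDec S curr (by simpa using h)

-- `while len(missing) < n: …; missing.append(curr); curr += 1`
def pvLoopA (S : List Int) (n : Int) (missing : List Int) (curr : Int) : List Int :=
  if (missing.length : Int) < n then
    let c := pvAdvance S curr
    pvLoopA S n (missing ++ [c]) (c + 1)
  else missing
termination_by (n - missing.length).toNat
decreasing_by simp; omega

def minimalKSum2 (nums : List Int) (k : Int) : Int :=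
  let mySet : PySem.Set Int := PySem.Set.ofList nums
  (pvLoopA mySet (k - nums.length) [] 1).sum

-- ===== PORT B =====
-- the `for v in sorted(set(nums))` loop of Source B, with accumulators (n, prev, total)
def pvLoopB (l : List Int) (n prev total : Int) : Int :=
  match l with
  | [] => total + PySem.Int.floordiv (n * (2 * prev + n + 1)) 2
  | v :: rest =>
    if v ≤ prev then pvLoopB rest n prev total
    else
      let gap := v - prev - 1
      let take := if gap < n then gap else n
      let total' := total + PySem.Int.floordiv (take * (2 * prev + take + 1)) 2
      let n' := n - take
      if n' = 0 then total' else pvLoopB rest n' v total'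

def minimalKSum2_alt (nums : List Int) (k : Int) : Int :=
  let n := k - nums.length
  if n ≤ 0 then 0
  else pvLoopB (PySem.List.sorted (PySem.Set.ofList nums) (fun x => x) false) n 0 0

-- ===== PRECONDITION & SPEC =====
def Spec_minimalKSum2 (nums : List Int) (k : Int) (out : Int) : Prop := out = minimalKSum2_alt nums k
instance (nums : List Int) (k : Int) (out : Int) : Decidable (Spec_minimalKSum2 nums k out) := by unfold Spec_minimalKSum2; infer_instance

-- ===== CLAIM (what is proved, stated in full; the proofs are below) =====
def Claim_equal_minimalKSum2 : Prop := ∀ (nums : List Int) (k : Int), Dom_minimalKSum2 nums k → Spec_minimalKSum2 nums k (minimalKSum2 nums k)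

-- ===== LEMMAS AND PROOFS =====

-- the sum of the n smallest positive integers ≥ curr that are not in S
def gMiss (S : List Int) : Nat → Int → Int
  | 0, _ => 0
  | m + 1, curr => let c := pvAdvance S curr; c + gMiss S m (c + 1)

-- blockSum c t = c + (c+1) + … + (c+t-1)
def blockSum (c : Int) : Nat → Int
  | 0 => 0
  | t + 1 => c + blockSum (c + 1) t

theorem twice_blockSum (t : Nat) : ∀ c : Int, 2 * blockSum c t = t * (2 * c + t - 1) := by
  induction t with
  | zero => intro c; simp [blockSum]
  | succ t ih =>
    intro c
    have := ih (c + 1)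
    simp only [blockSum]
    push_cast at this ⊢
    nlinarith [this]

theorem floordiv_two_mul (x : Int) : PySem.Int.floordiv (2 * x) 2 = x := by
  rw [PySem.Int.floordiv_eq_ediv_of_pos (by norm_num)]
  exact Int.mul_ediv_cancel_left x (by norm_num)

theorem pvAdvance_not_mem (S : List Int) (curr : Int) (h : curr ∉ S) : pvAdvance S curr = curr := by
  rw [pvAdvance]; simp [h]

theorem pvAdvance_step (S : List Int) (curr : Int) (h : curr ∈ S) :
    pvAdvance S curr = pvAdvance S (curr + 1) := by
  rw [pvAdvance]; simp [h]

theorem gMiss_skip (S : List Int) (m : Nat) (curr : Int) (h : curr ∈ S) :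
    gMiss S m curr = gMiss S m (curr + 1) := by
  cases m with
  | zero => simp [gMiss]
  | succ m => simp only [gMiss, pvAdvance_step S curr h]

-- consuming a block of t consecutive integers none of which is in S
theorem gMiss_free_block (S : List Int) (t : Nat) : ∀ (m : Nat) (curr : Int), t ≤ m →
    (∀ j : Int, curr ≤ j → j < curr + t → j ∉ S) →
    gMiss S m curr = blockSum curr t + gMiss S (m - t) (curr + t) := by
  induction t with
  | zero => intro m curr _ _; simp [blockSum]
  | succ t ih =>
    intro m curr hle hfree
    obtain ⟨m', rfl⟩ : ∃ m', m = m' + 1 := ⟨m - 1, by omega⟩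
    have hc : curr ∉ S := hfree curr le_rfl (by push_cast; omega)
    have hstep : gMiss S (m' + 1) curr = curr + gMiss S m' (curr + 1) := by
      simp only [gMiss, pvAdvance_not_mem S curr hc]
    rw [hstep, ih m' (curr + 1) (by omega)
      (by intro j h1 h2; exact hfree j (by omega) (by push_cast at h2 ⊢; omega))]
    simp only [blockSum]
    have : curr + 1 + (t : Int) = curr + ((t : Nat) + 1 : Nat) := by push_cast; ring
    rw [this]
    have hm : m' - t = m' + 1 - (t + 1) := by omega
    rw [hm]; ring

theorem loopB_eq (S : List Int) (l : List Int) : ∀ (n prev total : Int), 0 < n →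
    l.Pairwise (· < ·) → (∀ x ∈ l, x ∈ S) → (∀ x, x ∈ S → prev < x → x ∈ l) →
    pvLoopB l n prev total = total + gMiss S n.toNat (prev + 1) := by
  induction l with
  | nil =>
    intro n prev total hn _ _ hcov
    have hfree : ∀ j : Int, prev + 1 ≤ j → j < prev + 1 + (n.toNat : Int) → j ∉ S := by
      intro j h1 _ hj; exact absurd (hcov j hj (by omega)) (List.not_mem_nil)
    have := gMiss_free_block S n.toNat n.toNat (prev + 1) le_rfl hfree
    simp only [Nat.sub_self, gMiss] at this
    rw [this, add_zero]
    have h2 : (n.toNat : Int) * (2 * (prev + 1) + n.toNat - 1) = n * (2 * prev + n + 1) := by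
      have : (n.toNat : Int) = n := by omega
      rw [this]; ring
    simp only [pvLoopB]
    rw [← h2, ← twice_blockSum, floordiv_two_mul]
  | cons v rest ih =>
    intro n prev total hn hpw hsub hcov
    have hpw' := (List.pairwise_cons.mp hpw).2
    have hvlt := (List.pairwise_cons.mp hpw).1
    by_cases hv : v ≤ prev
    · simp only [pvLoopB, if_pos hv]
      exact ih n prev total hn hpw' (fun x hx => hsub x (List.mem_cons_of_mem v hx))
        (fun x hx hlt => by
          rcases List.mem_cons.mp (hcov x hx hlt) with rfl | h
          · omega
          · exact h)
    · push Not at hv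
      simp only [pvLoopB, if_neg (by omega : ¬ v ≤ prev)]
      set gap := v - prev - 1 with hgap
      have hgap0 : 0 ≤ gap := by omega
      have hfree : ∀ j : Int, prev + 1 ≤ j → j < prev + 1 + (gap.toNat : Int) → j ∉ S := by
        intro j h1 h2 hj
        have hjv : j < v := by omega
        rcases List.mem_cons.mp (hcov j hj (by omega)) with rfl | h
        · omega
        · exact absurd (hvlt j h) (by omega)
      by_cases hcase : gap < n
      · -- take = gap, n' = n - gap > 0
        have hn' : ¬ (n - gap = 0) := by omega
        simp only [if_pos hcase, if_neg hn']
        have hblock := gMiss_free_block S gap.toNat n.toNat (prev + 1) (by omega) hfree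
        have hv_mem : v ∈ S := hsub v (List.mem_cons_self)
        have hvc : prev + 1 + (gap.toNat : Int) = v := by omega
        rw [hvc] at hblock
        have hskip := gMiss_skip S (n.toNat - gap.toNat) v hv_mem
        rw [hskip] at hblock
        have hrec := ih (n - gap) v
          (total + PySem.Int.floordiv (gap * (2 * prev + gap + 1)) 2) (by omega) hpw'
          (fun x hx => hsub x (List.mem_cons_of_mem v hx))
          (fun x hx hlt => by
            rcases List.mem_cons.mp (hcov x hx (by omega)) with rfl | h
            · omega
            · exact h)
        rw [hrec]
        have hnt : (n - gap).toNat = n.toNat - gap.toNat := by omega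
        rw [hnt]
        have hform : PySem.Int.floordiv (gap * (2 * prev + gap + 1)) 2 = blockSum (prev + 1) gap.toNat := by
          have h2 : gap * (2 * prev + gap + 1) = 2 * blockSum (prev + 1) gap.toNat := by
            rw [twice_blockSum]
            have : (gap.toNat : Int) = gap := by omega
            rw [this]; ring
          rw [h2, floordiv_two_mul]
        rw [hblock, hform]; ring
      · -- take = n, n' = 0
        push Not at hcase
        simp only [if_neg (by omega : ¬ gap < n), sub_self]
        have hfree' : ∀ j : Int, prev + 1 ≤ j → j < prev + 1 + (n.toNat : Int) → j ∉ S := by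
          intro j h1 h2; exact hfree j h1 (by omega)
        have hblock := gMiss_free_block S n.toNat n.toNat (prev + 1) le_rfl hfree'
        simp only [Nat.sub_self, gMiss] at hblock
        rw [hblock, add_zero]
        have hform : PySem.Int.floordiv (n * (2 * prev + n + 1)) 2 = blockSum (prev + 1) n.toNat := by
          have h2 : n * (2 * prev + n + 1) = 2 * blockSum (prev + 1) n.toNat := by
            rw [twice_blockSum]
            have : (n.toNat : Int) = n := by omega
            rw [this]; ring
          rw [h2, floordiv_two_mul]
        rw [hform, if_pos trivial]

theorem loopA_sum (S : List Int) (n : Int) (missing : List Int) (curr : Int) :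
    (pvLoopA S n missing curr).sum = missing.sum + gMiss S (n - missing.length).toNat curr := by
  induction missing, curr using pvLoopA.induct (S := S) (n := n) with
  | case1 missing curr hlt c ih =>
    rw [pvLoopA, if_pos hlt, ih]
    have hm : (n - missing.length).toNat = (n - (missing.length + 1)).toNat + 1 := by omega
    simp only [List.length_append, List.length_cons, List.length_nil]
    push_cast
    rw [hm]
    simp only [gMiss, List.sum_append, List.sum_cons, List.sum_nil]
    ring_nf
    rfl
  | case2 missing curr hlt =>
    rw [pvLoopA, if_neg hlt]
    have : (n - missing.length).toNat = 0 := by omega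
    rw [this]; simp [gMiss]

-- ===== VERDICT (by name: the statement is the Claim_ definition above) =====
theorem minimalKSum2_spec : Claim_equal_minimalKSum2 := by
  intro nums k _
  unfold Spec_minimalKSum2 minimalKSum2 minimalKSum2_alt
  set S : List Int := PySem.Set.ofList nums with hS
  set n : Int := k - nums.length with hn
  rw [loopA_sum]
  simp only [List.sum_nil, List.length_nil, Nat.cast_zero, sub_zero, zero_add]
  by_cases hpos : n ≤ 0
  · rw [if_pos hpos]
    have : n.toNat = 0 := by omega
    rw [this]; simp [gMiss]
  · push Not at hpos
    rw [if_neg (by omega)]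
    set L := PySem.List.sorted S (fun x => x) false with hL
    have hperm : L.Perm S := PySem.List.sorted_perm S (fun x => x) false
    have hnd : L.Nodup := hperm.nodup_iff.mpr (PySem.Set.nodup_ofList nums)
    have hle : L.Pairwise (fun a b => a ≤ b) := PySem.List.sorted_pairwise S (fun x => x)
    have hlt : L.Pairwise (· < ·) :=
      (hle.and hnd).imp (fun h => lt_of_le_of_ne h.1 h.2)
    rw [loopB_eq S L n 0 0 hpos hlt
      (fun x hx => hperm.mem_iff.mp hx) (fun x hx _ => hperm.mem_iff.mpr hx)]
    norm_num
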